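-- pv_equiv track=rewrite | github.com/Mogady/Persona-Deep-Search | src/agents/nodes/validator.py | _simple_text_matching
-- ===== SOURCE A (Python) =====
-- from typing import Dict, List
-- from collections import defaultdict
--
-- def _simple_text_matching(facts: List[Dict]) -> Dict[str, List[Dict]]:
--     """
--     Fallback: Simple text-based fact grouping.
--
--     Args:
--         facts: List of fact dictionaries
--
--     Returns:
--         Dictionary of fact groups
--     """
--     groups = defaultdict(list)
--
--     for fact in facts:
--         content = fact.get("content", "").lower()
--         # Simple keyword-based grouping
--         key_words = set(content.split()[:5])  # First 5 words as key
--         key = "_".join(sorted(key_words))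
--         groups[key].append(fact)
--
--     # Filter groups with only 1 fact
--     return {k: v for k, v in groups.items() if len(v) > 1}
-- ===== SOURCE B (Python) =====
-- from typing import Dict, List
--
-- def _simple_text_matching(facts: List[Dict]) -> Dict[str, List[Dict]]:
--     """Staged grouping: compute all keys, take the distinct keys in first-occurrence
--     order, and for each distinct key collect its facts by rescanning; keep only
--     groups with more than one fact."""
--     def key_of(fact):
--         content = fact.get("content", "").lower()
--         return "_".join(sorted(set(content.split()[:5])))
--
--     keys = [key_of(f) for f in facts]
--     result: Dict[str, List[Dict]] = {}
--     for k in dict.fromkeys(keys):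
--         group = [f for f, kk in zip(facts, keys) if kk == k]
--         if len(group) > 1:
--             result[k] = group
--     return result
-- ===== Notes on version B (the rewrite author's own statement) =====
-- stated objective: alternative
-- what changed: A aggregates facts into a defaultdict in one pass and then filters singleton groups with a dict comprehension; B never maintains a dict of growing lists: it precomputes the key of every fact, dedups the keys in first-occurrence order, and builds each surviving group by an explicit rescan of the fact list, emitting it only when it has more than one member.
import Mathlib
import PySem

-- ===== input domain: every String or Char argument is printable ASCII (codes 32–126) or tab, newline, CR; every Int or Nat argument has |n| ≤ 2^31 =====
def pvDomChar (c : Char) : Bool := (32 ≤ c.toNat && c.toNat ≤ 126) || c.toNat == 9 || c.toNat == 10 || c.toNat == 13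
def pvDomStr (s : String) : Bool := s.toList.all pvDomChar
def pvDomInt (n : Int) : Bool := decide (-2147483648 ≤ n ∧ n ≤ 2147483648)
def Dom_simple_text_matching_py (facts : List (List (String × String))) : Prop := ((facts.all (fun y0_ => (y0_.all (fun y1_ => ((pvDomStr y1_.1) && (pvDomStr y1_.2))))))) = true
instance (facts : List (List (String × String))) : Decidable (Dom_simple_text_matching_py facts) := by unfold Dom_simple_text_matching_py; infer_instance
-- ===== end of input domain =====

-- B replaces A's one-pass defaultdict aggregation + singleton filter by staged passes:
-- compute all keys, dedup them, and rebuild each surviving group by rescanning the list.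

-- ===== PORT A =====
-- key = "_".join(sorted(set(fact.get("content","").lower().split()[:5])))
def pvKey (fact : List (String × String)) : String :=
  let content := PySem.Str.lower ((PySem.Dict.mk fact).getD "content" "")
  PySem.Str.join "_" (PySem.List.sorted (PySem.Set.ofList ((PySem.Str.split₀ content).take 5)) (fun x => x) false)

def simple_text_matching_py (facts : List (List (String × String))) : List (String × List (List (String × String))) :=
  -- groups = defaultdict(list); for fact: groups[key].append(fact)
  let groups := facts.foldl (fun d f => d.modify (pvKey f) [] (· ++ [f])) PySem.Dict.empty
  -- {k: v for k, v in groups.items() if len(v) > 1}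
  groups.items.filter (fun kv => decide (1 < kv.2.length))

-- ===== PORT B =====
-- B's key_of (same formula as A's, as in Source B)
def pvKeyOf (fact : List (String × String)) : String :=
  PySem.Str.join "_"
    (PySem.List.sorted
      (PySem.Set.ofList
        ((PySem.Str.split₀ (PySem.Str.lower ((PySem.Dict.mk fact).getD "content" ""))).take 5))
      (fun x => x) false)

def simple_text_matching_py_alt (facts : List (List (String × String))) : List (String × List (List (String × String))) :=
  -- keys = [key_of(f) for f in facts]
  let keys := facts.map pvKeyOf
  -- for k in dict.fromkeys(keys): group = [f for f,kk in zip(facts,keys) if kk == k]; if len(group) > 1: result[k] = group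
  (PySem.List.dedup keys).foldl
    (fun result k =>
      let group := ((facts.zip keys).filter (fun p => p.2 == k)).map (fun p => p.1)
      if 1 < group.length then result ++ [(k, group)] else result) []

-- ===== PRECONDITION & SPEC =====
def Spec_simple_text_matching_py (facts : List (List (String × String))) (out : List (String × List (List (String × String)))) : Prop := out = simple_text_matching_py_alt facts
instance (facts : List (List (String × String))) (out : List (String × List (List (String × String)))) : Decidable (Spec_simple_text_matching_py facts out) := by unfold Spec_simple_text_matching_py; infer_instance

-- ===== CLAIM (what is proved, stated in full; the proofs are below) =====
def Claim_equal_simple_text_matching_py : Prop := ∀ (facts : List (List (String × String))), Dom_simple_text_matching_py facts → Spec_simple_text_matching_py facts (simple_text_matching_py facts)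

-- ===== LEMMAS AND PROOFS =====

-- the two key helpers are the same function
theorem pvKeyOf_eq_pvKey : pvKeyOf = pvKey := rfl

-- items of A's key-grouping fold: first occurrences of keys, each with all its facts in order
theorem pv_items_group {α : Type} (key : α → String) (l : List α) :
    (l.foldl (fun d f => d.modify (key f) [] (· ++ [f])) PySem.Dict.empty).items
      = (PySem.List.dedup (l.map key)).map (fun k => (k, l.filter (fun f => key f == k))) := by
  have hnd : (l.foldl (fun d f => d.modify (key f) [] (· ++ [f])) PySem.Dict.empty).keys.Nodup :=
    PySem.Dict.nodup_keys_foldl_modify_key l key [] (fun _ f v => v ++ [f]) PySem.Dict.empty (by simp)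
  rw [PySem.Dict.items_eq_map_keys _ hnd []]
  rw [PySem.Dict.keys_foldl_modify_key l key [] (fun _ f v => v ++ [f]) PySem.Dict.empty]
  have hk : PySem.Set.update (PySem.Dict.empty : PySem.Dict String (List α)).keys (l.map key)
      = PySem.List.dedup (l.map key) := rfl
  rw [hk]
  refine List.map_congr_left ?_
  intro k _
  congr 1
  have hfm : l.foldl (fun d f => d.modify (key f) [] (· ++ [f])) PySem.Dict.empty
      = (l.map (fun f => (key f, f))).foldl (fun d p => d.modify p.1 [] (· ++ [p.2]))
          PySem.Dict.empty := by
    rw [List.foldl_map]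
  rw [hfm, PySem.Dict.getD_foldl_modify_append]
  simp [List.filter_map, Function.comp_def]

-- B's per-key rescan over zip(facts, keys) is the plain filter by the key function
theorem pv_zip_rescan {α : Type} (key : α → String) (l : List α) (k : String) :
    (((l.zip (l.map key)).filter (fun p => p.2 == k)).map (fun p => p.1))
      = l.filter (fun f => key f == k) := by
  induction l with
  | nil => rfl
  | cons x t ih =>
    by_cases h : key x = k <;> simp [h, ih]

-- ===== VERDICT (by name: the statement is the Claim_ definition above) =====
theorem simple_text_matching_py_spec : Claim_equal_simple_text_matching_py := by
  intro facts _
  simp only [Spec_simple_text_matching_py, simple_text_matching_py, simple_text_matching_py_alt,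
    pvKeyOf_eq_pvKey]
  -- B's guarded append loop = filter-then-map over the deduped keys
  rw [PySem.List.foldl_append_ite
        (p := fun k => 1 < ((((facts.zip (facts.map pvKey)).filter (fun p => p.2 == k)).map
          (fun p => p.1)).length))
        (f := fun k => (k, ((facts.zip (facts.map pvKey)).filter (fun p => p.2 == k)).map
          (fun p => p.1)))]
  rw [pv_items_group pvKey facts, List.filter_map]
  simp only [List.nil_append, pv_zip_rescan, Function.comp_def]
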